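-- pv_equiv track=rewrite | github.com/BrettMeirhofer/RaspberryGreenhouse | Bin/helper/bluetooth.py | get_rgb_hex
-- ===== SOURCE A (Python) =====
-- def int_to_hex(intv):
--     h = hex(intv).replace("0x", "")
--     while len(h) < 2:
--         h = "0" + h
--     return h
--
-- def get_rgb_hex(r, g, b):
--     bins = [51, 5, 13, r, g, b, 0, 0, 0, 0, 0, 0, 0, 0, 0, 0, 0, 0, 0]
--     sig = 0
--     for item in bins:
--         sig = sig ^ item
--     bins.append(sig)
--     bins_str = map(int_to_hex, bins)
--     return "".join(bins_str)
-- ===== SOURCE B (Python) =====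
-- def get_rgb_hex(r, g, b):
--     # XOR of the 13 trailing zero bytes is a no-op, so the checksum is a closed form.
--     sig = 51 ^ 5 ^ 13 ^ r ^ g ^ b
--     return ("33050d"
--             + format(r, "02x") + format(g, "02x") + format(b, "02x")
--             + "00" * 13
--             + format(sig, "02x"))
-- ===== Notes on version B (the rewrite author's own statement) =====
-- stated objective: simpler
-- what changed: Replaces the 19-element list, the XOR accumulation loop and the map/join pass by a closed form: the checksum is 51^5^13^r^g^b (zeros drop out), and the output is a direct concatenation of the constant prefix, format(v,'02x') for r,g,b, a constant run of thirteen '00' groups, and the checksum's hex.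
import Mathlib
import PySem

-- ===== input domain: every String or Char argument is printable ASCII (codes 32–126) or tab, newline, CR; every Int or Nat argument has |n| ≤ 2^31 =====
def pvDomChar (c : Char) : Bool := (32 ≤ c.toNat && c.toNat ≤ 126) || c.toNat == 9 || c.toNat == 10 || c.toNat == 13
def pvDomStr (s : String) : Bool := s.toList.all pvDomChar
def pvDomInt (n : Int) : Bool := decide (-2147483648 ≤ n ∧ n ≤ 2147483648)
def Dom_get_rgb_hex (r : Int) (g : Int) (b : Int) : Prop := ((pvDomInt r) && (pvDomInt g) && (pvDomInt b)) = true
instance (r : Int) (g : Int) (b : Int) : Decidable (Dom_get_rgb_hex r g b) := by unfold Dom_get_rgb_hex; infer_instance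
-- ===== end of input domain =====

-- B replaces A's list/loop/map-join by a closed-form checksum and direct concatenation (objective: simpler).

-- ===== PORT A =====
-- hex digits of n (lowercase), most significant first; fuel = n (enough since n/16 < n).
def pvHexAux : Nat → Nat → List Char → List Char
  | 0, _, acc => acc
  | f+1, n, acc => if n = 0 then acc else pvHexAux f (n / 16) (Nat.digitChar (n % 16) :: acc)

def pvHexNat (n : Nat) : List Char := if n = 0 then ['0'] else pvHexAux n n []

-- port of Python's hex(v): "-0x…" for negative v, "0x…" otherwise (as a char list)
def pvPyHexChars (v : Int) : List Char :=
  (if v < 0 then ['-', '0', 'x'] else ['0', 'x']) ++ pvHexNat v.natAbs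

-- the while-loop 'while len(h) < 2: h = "0" + h'
def pvPadWhile (h : List Char) : List Char :=
  if h.length < 2 then pvPadWhile ('0' :: h) else h
termination_by 2 - h.length
decreasing_by simp_all; omega

-- int_to_hex, on char lists: hex(v).replace("0x",""), then the padding loop
def pvIntToHexChars (v : Int) : List Char :=
  pvPadWhile (PySem.Chars.replace (pvPyHexChars v) ['0', 'x'] [])

def int_to_hex (intv : Int) : String := String.ofList (pvIntToHexChars intv)

def get_rgb_hex (r : Int) (g : Int) (b : Int) : String :=
  let bins : List Int := [51, 5, 13, r, g, b, 0, 0, 0, 0, 0, 0, 0, 0, 0, 0, 0, 0, 0]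
  let sig : Int := bins.foldl (fun s item => PySem.Int.bxor s item) 0
  let bins := bins ++ [sig]
  PySem.Str.join "" (bins.map int_to_hex)

-- ===== PORT B =====
-- port of format(v, "02x"): sign + lowercase hex digits, zero-filled to width 2
def pvFmt02x (v : Int) : List Char :=
  PySem.Chars.zfill ((if v < 0 then ['-'] else []) ++ pvHexNat v.natAbs) 2

def get_rgb_hex_alt (r : Int) (g : Int) (b : Int) : String :=
  let sig : Int :=
    PySem.Int.bxor (PySem.Int.bxor (PySem.Int.bxor (PySem.Int.bxor (PySem.Int.bxor 51 5) 13) r) g) b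
  String.ofList
    ("33050d".toList ++ pvFmt02x r ++ pvFmt02x g ++ pvFmt02x b
      ++ (List.replicate 13 ['0', '0']).flatten   -- "00" * 13
      ++ pvFmt02x sig)

-- ===== PRECONDITION & SPEC =====
def Spec_get_rgb_hex (r : Int) (g : Int) (b : Int) (out : String) : Prop := out = get_rgb_hex_alt r g b
instance (r : Int) (g : Int) (b : Int) (out : String) : Decidable (Spec_get_rgb_hex r g b out) := by unfold Spec_get_rgb_hex; infer_instance

-- ===== CLAIM (what is proved, stated in full; the proofs are below) =====
def Claim_equal_get_rgb_hex : Prop := ∀ (r : Int) (g : Int) (b : Int), Dom_get_rgb_hex r g b → Spec_get_rgb_hex r g b (get_rgb_hex r g b)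

-- ===== LEMMAS AND PROOFS =====

-- hex digits are ordinary digit chars: never 'x', '+' or '-'
def pvPlainChar (c : Char) : Prop := c ≠ 'x' ∧ c ≠ '+' ∧ c ≠ '-'

theorem pvDigitChar_plain (m : Nat) (h : m < 16) : pvPlainChar (Nat.digitChar m) := by
  unfold pvPlainChar
  interval_cases m <;> exact ⟨by decide, by decide, by decide⟩

theorem pvHexAux_plain (f : Nat) : ∀ (n : Nat) (acc : List Char),
    (∀ c ∈ acc, pvPlainChar c) → ∀ c ∈ pvHexAux f n acc, pvPlainChar c := by
  induction f with
  | zero => intro n acc hacc c hc; exact hacc c hc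
  | succ f ih =>
      intro n acc hacc c hc
      simp only [pvHexAux] at hc
      split at hc
      · exact hacc c hc
      · refine ih _ _ ?_ c hc
        intro d hd
        rw [List.mem_cons] at hd
        rcases hd with hd | hd
        · subst hd; exact pvDigitChar_plain _ (Nat.mod_lt _ (by omega))
        · exact hacc d hd

theorem pvHexNat_plain (n : Nat) : ∀ c ∈ pvHexNat n, pvPlainChar c := by
  unfold pvHexNat
  split
  · intro c hc; simp at hc; subst hc; exact ⟨by decide, by decide, by decide⟩
  · exact pvHexAux_plain n n [] (by simp)

theorem pvHexAux_len (f : Nat) : ∀ (n : Nat) (acc : List Char),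
    acc.length ≤ (pvHexAux f n acc).length := by
  induction f with
  | zero => intro n acc; simp [pvHexAux]
  | succ f ih =>
      intro n acc
      simp only [pvHexAux]
      split
      · exact le_refl _
      · exact Nat.le_trans (by simp) (ih (n / 16) (Nat.digitChar (n % 16) :: acc))

theorem pvHexNat_len (n : Nat) : 1 ≤ (pvHexNat n).length := by
  unfold pvHexNat
  split
  · simp
  · rename_i h
    obtain ⟨f, rfl⟩ : ∃ f, n = f + 1 := ⟨n - 1, by omega⟩
    simp only [pvHexAux, if_neg h]
    exact Nat.le_trans (by simp) (pvHexAux_len f _ _)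

-- one unfolding step of the replace scanner
theorem pvGo_succ_cons (old new : List Char) (f : Nat) (c : Char) (t acc : List Char) :
    PySem.Chars.replace.go old new (f + 1) (c :: t) acc =
      if old.isPrefixOf (c :: t) then
        PySem.Chars.replace.go old new f (List.drop old.length (c :: t)) (new.reverse ++ acc)
      else PySem.Chars.replace.go old new f t (c :: acc) := by
  simp [PySem.Chars.replace.go]

theorem pvGo_succ_nil (old new : List Char) (f : Nat) (acc : List Char) :
    PySem.Chars.replace.go old new (f + 1) [] acc = acc.reverse := by
  simp [PySem.Chars.replace.go]

-- the scanner consumes a leading "0x"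
theorem pvGo_step0x (f : Nat) (ds acc : List Char) :
    PySem.Chars.replace.go ['0','x'] [] (f + 1) ('0'::'x'::ds) acc =
      PySem.Chars.replace.go ['0','x'] [] f ds acc := by
  rw [pvGo_succ_cons]; simp [List.isPrefixOf]

-- the scanner copies a list with no 'x' unchanged
theorem pvGo_no_x (f : Nat) : ∀ (l acc : List Char), 'x' ∉ l →
    PySem.Chars.replace.go ['0', 'x'] [] f l acc = acc.reverse ++ l := by
  induction f with
  | zero => intro l acc _; rfl
  | succ f ih =>
      intro l acc hl
      cases l with
      | nil => rw [pvGo_succ_nil]; simp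
      | cons c t =>
          have hpre : List.isPrefixOf ['0', 'x'] (c :: t) = false := by
            cases t with
            | nil => simp [List.isPrefixOf]
            | cons d t' =>
                have hd : d ≠ 'x' := by intro h; exact hl (by simp [h])
                simp [List.isPrefixOf, beq_iff_eq]
                intro _ h; exact absurd h.symm hd
          rw [pvGo_succ_cons, hpre]
          simp only [Bool.false_eq_true, if_false]
          rw [ih t (c :: acc) (fun h => hl (by simp [h]))]
          simp

theorem pvReplace_pos (ds : List Char) (hds : 'x' ∉ ds) :
    PySem.Chars.replace ('0'::'x'::ds) ['0', 'x'] [] = ds := by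
  unfold PySem.Chars.replace
  rw [if_neg (by simp)]
  simp only [List.length_cons]
  rw [pvGo_step0x, pvGo_no_x _ ds [] hds]
  simp

theorem pvReplace_neg (ds : List Char) (hds : 'x' ∉ ds) :
    PySem.Chars.replace ('-'::'0'::'x'::ds) ['0', 'x'] [] = '-'::ds := by
  unfold PySem.Chars.replace
  rw [if_neg (by simp)]
  simp only [List.length_cons]
  rw [pvGo_succ_cons]
  rw [show (['0','x'] : List Char).isPrefixOf ('-'::'0'::'x'::ds) = false by
        simp [List.isPrefixOf]]
  simp only [Bool.false_eq_true, if_false]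
  rw [pvGo_step0x, pvGo_no_x _ ds ['-'] hds]
  simp

theorem pvPadWhile_ge (h : List Char) (hh : 2 ≤ h.length) : pvPadWhile h = h := by
  rw [pvPadWhile]; rw [if_neg (by omega)]

theorem pvPadWhile_one (c : Char) : pvPadWhile [c] = ['0', c] := by
  rw [pvPadWhile]; rw [if_pos (by simp)]; exact pvPadWhile_ge _ (by simp)

-- the key pointwise lemma: A's int_to_hex equals B's format(v, "02x")
theorem pvIntToHex_eq_fmt (v : Int) : pvIntToHexChars v = pvFmt02x v := by
  have hplain := pvHexNat_plain v.natAbs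
  have hx : 'x' ∉ pvHexNat v.natAbs := fun h => (hplain _ h).1 rfl
  have hlen := pvHexNat_len v.natAbs
  unfold pvIntToHexChars pvFmt02x pvPyHexChars
  by_cases hv : v < 0
  · rw [if_pos hv, if_pos hv]
    simp only [List.cons_append, List.nil_append]
    rw [pvReplace_neg _ hx]
    rw [pvPadWhile_ge _ (by simp; omega)]
    unfold PySem.Chars.zfill
    rw [if_pos (by simp; omega)]
  · rw [if_neg hv, if_neg hv]
    simp only [List.cons_append, List.nil_append]
    rw [pvReplace_pos _ hx]
    rcases ds : pvHexNat v.natAbs with _ | ⟨c, t⟩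
    · rw [ds] at hlen; simp at hlen
    · have hc : ¬ (c = '+' ∨ c = '-') := by
        have := hplain c (by rw [ds]; simp)
        rintro (h | h)
        · exact this.2.1 h
        · exact this.2.2 h
      cases t with
      | nil =>
          rw [pvPadWhile_one]
          unfold PySem.Chars.zfill
          rw [if_neg (by simp)]
          simp [hc]
      | cons d t' =>
          rw [pvPadWhile_ge _ (by simp)]
          unfold PySem.Chars.zfill
          rw [if_pos (by simp; omega)]

-- Chars.join with empty separator is flatten
theorem pvJoin_nil_flatten (parts : List (List Char)) :
    PySem.Chars.join [] parts = parts.flatten := by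
  unfold PySem.Chars.join
  induction parts with
  | nil => simp [List.intercalate]
  | cons p ps ih =>
      cases ps with
      | nil => simp [List.intercalate]
      | cons q qs =>
          simp only [List.intercalate] at *
          simp [List.intersperse] at *
          simpa using ih

-- ===== VERDICT (by name: the statement is the Claim_ definition above) =====
theorem get_rgb_hex_spec : Claim_equal_get_rgb_hex := by
  intro r g b _
  show get_rgb_hex r g b = get_rgb_hex_alt r g b
  have htl : ∀ v : Int, (int_to_hex v).toList = pvFmt02x v := fun v => by
    unfold int_to_hex
    simp [pvIntToHex_eq_fmt]
  unfold get_rgb_hex get_rgb_hex_alt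
  simp only [List.foldl, PySem.Int.bxor_zero]
  rw [show PySem.Int.bxor 0 51 = 51 from by decide]
  unfold PySem.Str.join
  congr 1
  rw [show ("" : String).toList = [] from rfl]
  rw [pvJoin_nil_flatten]
  simp only [List.map_append, List.map_cons, List.map_nil, List.flatten_append,
    List.flatten_cons, List.flatten_nil, htl]
  rw [show pvFmt02x 51 = ['3','3'] from by decide,
      show pvFmt02x 5 = ['0','5'] from by decide,
      show pvFmt02x 13 = ['0','d'] from by decide,
      show pvFmt02x 0 = ['0','0'] from by decide,
      show "33050d".toList = ['3','3','0','5','0','d'] from rfl,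
      show (List.replicate 13 (['0','0'] : List Char)).flatten =
        ['0','0','0','0','0','0','0','0','0','0','0','0','0',
         '0','0','0','0','0','0','0','0','0','0','0','0','0'] from rfl]
  simp
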